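-- pv_equiv track=rewrite | github.com/Sreecharan03/Smart-email-automation | backend/services/gmail/gmail_service.py | _determine_folder
-- ===== SOURCE A (Python) =====
-- from typing import Optional, List, Dict, Any, Tuple
--
-- def _determine_folder(labels: List[str]) -> str:
--     """Determine folder name from Gmail labels"""
--     try:
--         # Gmail system labels mapping
--         if 'INBOX' in labels:
--             return 'INBOX'
--         elif 'SENT' in labels:
--             return 'SENT'
--         elif 'DRAFT' in labels:
--             return 'DRAFT'
--         elif 'SPAM' in labels:
--             return 'SPAM'
--         elif 'TRASH' in labels:
--             return 'TRASH'
--         elif 'STARRED' in labels: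
--             return 'STARRED'
--         else:
--             # Check for custom labels (non-system labels)
--             for label in labels:
--                 if not label.startswith('CATEGORY_') and label not in ['IMPORTANT', 'UNREAD']:
--                     return label
--
--             return 'INBOX'  # Default fallback
--
--     except Exception:
--         return 'INBOX'
-- ===== SOURCE B (Python) =====
-- _SYSTEM = ('INBOX', 'SENT', 'DRAFT', 'SPAM', 'TRASH', 'STARRED')
-- _PRIORITY = {name: i for i, name in enumerate(_SYSTEM)}
--
-- def _determine_folder(labels):
--     """Determine folder name from Gmail labels: one pass, best-rank accumulator."""
--     best = len(_SYSTEM)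
--     custom = None
--     for label in labels:
--         rank = _PRIORITY.get(label, len(_SYSTEM))
--         if rank < best:
--             best = rank
--         if custom is None and not label.startswith('CATEGORY_') and label not in ('IMPORTANT', 'UNREAD'):
--             custom = label
--     if best < len(_SYSTEM):
--         return _SYSTEM[best]
--     return custom if custom is not None else 'INBOX'
-- ===== Notes on version B (the rewrite author's own statement) =====
-- stated objective: alternative
-- what changed: Single pass over labels with an accumulator (minimum system-label rank from a priority dict, plus first acceptable custom label), instead of A's six separate membership scans followed by a fallback loop.
import Mathlib
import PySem

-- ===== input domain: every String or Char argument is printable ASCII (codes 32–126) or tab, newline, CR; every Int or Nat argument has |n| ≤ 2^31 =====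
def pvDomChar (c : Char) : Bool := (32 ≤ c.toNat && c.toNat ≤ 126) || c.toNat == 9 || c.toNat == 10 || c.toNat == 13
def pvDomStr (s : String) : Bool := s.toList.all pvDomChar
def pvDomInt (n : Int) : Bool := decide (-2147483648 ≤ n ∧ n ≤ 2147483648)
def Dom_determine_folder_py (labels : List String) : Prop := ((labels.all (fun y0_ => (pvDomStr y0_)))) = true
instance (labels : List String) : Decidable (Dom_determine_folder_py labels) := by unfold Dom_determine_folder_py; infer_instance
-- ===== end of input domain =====

-- B makes one pass over labels with an accumulator (minimum system-label rank from a
-- priority dict + first acceptable custom label) instead of A's six membership scans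
-- followed by a fallback loop; objective: alternative.

-- shared by both ports: the custom-label test, written identically in A's and B's Python
def pvCustomOk (l : String) : Bool :=
  !(PySem.Str.startswith l "CATEGORY_") && !(l == "IMPORTANT" || l == "UNREAD")

-- ===== PORT A =====
-- A's fallback loop over labels, as structural recursion.
def pvAFallback : List String → String
  | [] => "INBOX"
  | l :: rest => if pvCustomOk l then l else pvAFallback rest

def determine_folder_py (labels : List String) : String :=
  if "INBOX" ∈ labels then "INBOX"
  else if "SENT" ∈ labels then "SENT"
  else if "DRAFT" ∈ labels then "DRAFT"
  else if "SPAM" ∈ labels then "SPAM"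
  else if "TRASH" ∈ labels then "TRASH"
  else if "STARRED" ∈ labels then "STARRED"
  else pvAFallback labels

-- ===== PORT B =====
def pvSystem : List String := ["INBOX", "SENT", "DRAFT", "SPAM", "TRASH", "STARRED"]

-- _PRIORITY.get(label, len(_SYSTEM)); ranks are small non-negative ints, kept as Nat
def pvRank (l : String) : Nat :=
  (PySem.Dict.ofList [("INBOX", 0), ("SENT", 1), ("DRAFT", 2),
                      ("SPAM", 3), ("TRASH", 4), ("STARRED", 5)]).getD l 6

-- B's single for-loop: state = (best, custom)
def pvScan : List String → Nat → Option String → Nat × Option String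
  | [], best, custom => (best, custom)
  | l :: rest, best, custom =>
    let rank := pvRank l
    let best' := if rank < best then rank else best
    let custom' := if custom = none ∧ pvCustomOk l then some l else custom
    pvScan rest best' custom'

def determine_folder_py_alt (labels : List String) : String :=
  if (pvScan labels 6 none).1 < 6 then
    pvSystem.getD (pvScan labels 6 none).1 "INBOX"   -- _SYSTEM[best]; best < 6 here
  else (pvScan labels 6 none).2.getD "INBOX"

-- ===== PRECONDITION & SPEC =====
def Spec_determine_folder_py (labels : List String) (out : String) : Prop := out = determine_folder_py_alt labels
instance (labels : List String) (out : String) : Decidable (Spec_determine_folder_py labels out) := by unfold Spec_determine_folder_py; infer_instance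

-- ===== CLAIM =====
def Claim_equal_determine_folder_py : Prop := ∀ (labels : List String), Dom_determine_folder_py labels → Spec_determine_folder_py labels (determine_folder_py labels)

-- ===== LEMMAS AND PROOFS =====

theorem pvRank_char (l : String) :
    pvRank l = if l = "INBOX" then 0 else if l = "SENT" then 1 else if l = "DRAFT" then 2
      else if l = "SPAM" then 3 else if l = "TRASH" then 4 else if l = "STARRED" then 5
      else 6 := by
  have hd : PySem.Dict.ofList [("INBOX", (0:Nat)), ("SENT", 1), ("DRAFT", 2),
      ("SPAM", 3), ("TRASH", 4), ("STARRED", 5)] =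
      PySem.Dict.mk [("INBOX", 0), ("SENT", 1), ("DRAFT", 2),
      ("SPAM", 3), ("TRASH", 4), ("STARRED", 5)] := by decide
  simp only [pvRank, hd, PySem.Dict.getD_eq_get?_getD, PySem.Dict.get?_mk_cons]
  split_ifs <;> simp_all [PySem.Dict.get?]

theorem pvRank_le (l : String) : pvRank l ≤ 6 := by
  rw [pvRank_char]; split_ifs <;> omega

-- right-fold form of the best-rank accumulator
def pvMinRank : List String → Nat
  | [] => 6
  | l :: rest => min (pvRank l) (pvMinRank rest)

theorem pvScan_fst : ∀ (ls : List String) (b : Nat) (c : Option String), b ≤ 6 →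
    (pvScan ls b c).1 = min b (pvMinRank ls) := by
  intro ls
  induction ls with
  | nil => intro b c hb; simp [pvScan, pvMinRank]; omega
  | cons l rest ih =>
    intro b c hb
    have hr := pvRank_le l
    simp only [pvScan, pvMinRank]
    by_cases h : pvRank l < b
    · simp only [h, if_pos]; rw [ih _ _ (by omega)]; omega
    · simp only [h, ite_false]; rw [ih _ _ hb]; omega

theorem pvScan_snd (ls : List String) (b : Nat) (c : Option String) :
    (pvScan ls b c).2 = match c with
      | some x => some x
      | none => ls.find? pvCustomOk := by
  induction ls generalizing b c with
  | nil => cases c <;> rfl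
  | cons l rest ih =>
    cases c with
    | some x => simp only [pvScan, ih]; simp
    | none =>
      simp only [pvScan, ih, List.find?]
      by_cases h : pvCustomOk l <;> simp_all

set_option maxHeartbeats 1000000 in
theorem pvMinRank_char (ls : List String) :
    pvMinRank ls =
      if "INBOX" ∈ ls then 0 else if "SENT" ∈ ls then 1 else if "DRAFT" ∈ ls then 2
      else if "SPAM" ∈ ls then 3 else if "TRASH" ∈ ls then 4 else if "STARRED" ∈ ls then 5
      else 6 := by
  induction ls with
  | nil => simp [pvMinRank]
  | cons l rest ih =>
    simp only [pvMinRank, ih, List.mem_cons, pvRank_char]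
    by_cases h0 : l = "INBOX" <;> by_cases h1 : l = "SENT" <;> by_cases h2 : l = "DRAFT" <;>
      by_cases h3 : l = "SPAM" <;> by_cases h4 : l = "TRASH" <;> by_cases h5 : l = "STARRED" <;>
      simp_all <;> split_ifs <;> simp_all

theorem pvAFallback_eq_find (labels : List String) :
    pvAFallback labels = (labels.find? pvCustomOk).getD "INBOX" := by
  induction labels with
  | nil => rfl
  | cons l rest ih =>
    simp only [pvAFallback, List.find?, ih]
    cases h : pvCustomOk l <;> simp_all

-- ===== VERDICT =====
theorem determine_folder_py_spec : Claim_equal_determine_folder_py := by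
  intro labels _
  unfold Spec_determine_folder_py determine_folder_py determine_folder_py_alt
  rw [pvScan_fst labels 6 none (by omega), pvScan_snd, pvMinRank_char, pvAFallback_eq_find]
  split_ifs <;> simp_all [pvSystem]
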